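-- pv_equiv track=rewrite | github.com/Scontrerasg7/eafit_training_camp | contest_07_07/f_function_and_function.py | recursive_function
-- ===== SOURCE A (Python) =====
-- enclosed_areas = {
--     0: 1,
--     1: 0,
--     2: 0,
--     3: 0,
--     4: 1,
--     5: 0,
--     6: 1,
--     7: 0,
--     8: 2,
--     9: 1
-- }
--
-- def real_g_4_life(x):
--     digits = [int(digit) for digit in str(x)]
--     return sum([enclosed_areas[digit] for digit in digits])
--
-- def recursive_function(x, k):
--     if k == 0:
--         return x
--
--     elif x == 0:
--         if k % 2 == 0:
--             return 0
--         else: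
--             return 1
--
--     elif x == 1 or x == 2:
--         if k % 2 == 0:
--             return 1
--         else:
--             return 0
--
--     else:
--         return recursive_function(real_g_4_life(x), k - 1)
-- ===== SOURCE B (Python) =====
-- def _area_sum(x):
--     # total enclosed area of the decimal digits of x (x >= 0), arithmetically
--     total = 0
--     while True:
--         x, d = divmod(x, 10)
--         total += 1 if d in (0, 4, 6, 9) else 2 if d == 8 else 0
--         if x == 0:
--             return total
--
-- def recursive_function(x, k):
--     while k != 0 and (x > 2):
--         x = _area_sum(x)
--         k -= 1
--     if k == 0:
--         return x
--     return k % 2 if x == 0 else 1 - k % 2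
-- ===== Notes on version B (the rewrite author's own statement) =====
-- stated objective: simpler
-- what changed: B replaces A's tail recursion with an iterative while-loop and computes the digit enclosed-area sum arithmetically via divmod instead of str()/int() round-trips and a dict lookup, with the parity branches folded into k%2 formulas; Pre_ excludes x<0 with k!=0, where A raises ValueError (int('-')).
import Mathlib
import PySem

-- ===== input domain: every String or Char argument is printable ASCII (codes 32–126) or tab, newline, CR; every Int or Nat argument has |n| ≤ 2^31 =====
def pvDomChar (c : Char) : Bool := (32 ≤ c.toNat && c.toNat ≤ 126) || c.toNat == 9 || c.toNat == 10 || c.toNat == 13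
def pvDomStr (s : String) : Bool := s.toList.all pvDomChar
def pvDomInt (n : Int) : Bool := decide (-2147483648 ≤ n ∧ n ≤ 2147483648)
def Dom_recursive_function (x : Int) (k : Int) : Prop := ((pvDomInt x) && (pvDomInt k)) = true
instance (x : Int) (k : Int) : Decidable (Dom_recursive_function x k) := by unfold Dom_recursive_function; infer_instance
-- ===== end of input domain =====

-- B replaces A's tail recursion with an iterative loop, computes the digit-area sum
-- arithmetically by divmod instead of going through str/int, and replaces the dict and
-- the parity branches with small arithmetic formulas; return value only, no side effects.

-- ===== PORT A =====
-- enclosed_areas dict (module constant)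
def pvEnclosedAreas : PySem.Dict Int Int :=
  PySem.Dict.ofList [(0, 1), (1, 0), (2, 0), (3, 0), (4, 1), (5, 0), (6, 1), (7, 0), (8, 2), (9, 1)]

-- real_g_4_life: digits of str(x), each through int(), summed through the dict.
-- int(digit) raises on '-' (x < 0); that input is outside Pre_, the port defaults it to 0 there.
def real_g_4_life (x : Int) : Int :=
  let digits := (PySem.Int.toChars x).map (fun c => (PySem.Int.ofChars? [c]).getD 0)
  (digits.map (fun d => pvEnclosedAreas.getD d 0)).sum

-- the recursion, made total with fuel (inside Pre_ the fuel below always suffices;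
-- it is exhausted only on inputs Python A does not return on)
def recFuelA : Nat → Int → Int → Int
  | 0, x, _ => x
  | f + 1, x, k =>
    if k = 0 then x
    else if x = 0 then (if PySem.Int.mod k 2 = 0 then 0 else 1)
    else if x = 1 ∨ x = 2 then (if PySem.Int.mod k 2 = 0 then 1 else 0)
    else recFuelA f (real_g_4_life x) (k - 1)

def recursive_function (x : Int) (k : Int) : Int := recFuelA (x.natAbs + k.natAbs + 1) x k

-- ===== PORT B =====
-- area of one decimal digit, arithmetically
def pvDigitArea (d : Int) : Int :=
  if d = 0 ∨ d = 4 ∨ d = 6 ∨ d = 9 then 1 else if d = 8 then 2 else 0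

-- _area_sum's do-while loop over divmod, made total with fuel (sufficient for x ≥ 0;
-- on x < 0 Python B's loop does not terminate, outside Pre_)
def areaSumFuel : Nat → Int → Int → Int
  | 0, _, total => total
  | f + 1, x, total =>
    let q := PySem.Int.floordiv x 10
    let d := PySem.Int.mod x 10
    let total' := total + pvDigitArea d
    if q = 0 then total' else areaSumFuel f q total'

def pv_area_sum (x : Int) : Int := areaSumFuel (x.natAbs + 1) x 0

-- B's while-loop, made total with fuel (same sufficiency remark as for A's port)
def recFuelB : Nat → Int → Int → Int
  | 0, x, _ => x
  | f + 1, x, k =>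
    if k ≠ 0 ∧ x > 2 then recFuelB f (pv_area_sum x) (k - 1)
    else if k = 0 then x
    else if x = 0 then PySem.Int.mod k 2
    else 1 - PySem.Int.mod k 2

def recursive_function_alt (x : Int) (k : Int) : Int := recFuelB (x.natAbs + k.natAbs + 1) x k

-- ===== PRECONDITION & SPEC =====
-- Pre_ excludes x < 0 with k ≠ 0: there Python A raises ValueError (int('-') on the sign
-- character of str(x)).
def Pre_recursive_function (x : Int) (k : Int) : Prop := 0 ≤ x ∨ k = 0
instance (x : Int) (k : Int) : Decidable (Pre_recursive_function x k) := by unfold Pre_recursive_function; infer_instance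
def pvWitness_recursive_function : Int × Int := (886, 3)

def Spec_recursive_function (x : Int) (k : Int) (out : Int) : Prop := out = recursive_function_alt x k
instance (x : Int) (k : Int) (out : Int) : Decidable (Spec_recursive_function x k out) := by unfold Spec_recursive_function; infer_instance

-- ===== CLAIM (what is proved, stated in full; the proofs are below) =====
def Claim_equal_recursive_function : Prop := ∀ (x : Int) (k : Int), Dom_recursive_function x k → Pre_recursive_function x k → Spec_recursive_function x k (recursive_function x k)

-- ===== LEMMAS AND PROOFS =====

-- the per-character area A computes: int(c) (defaulted) looked up in the dict
def pvChArea (c : Char) : Int := pvEnclosedAreas.getD ((PySem.Int.ofChars? [c]).getD 0) 0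

lemma chArea_digitChar (d : Nat) (hd : d < 10) : pvChArea (Nat.digitChar d) = pvDigitArea (d : Int) := by
  interval_cases d <;> decide

lemma getD_areas_nonneg (d : Int) : 0 ≤ pvEnclosedAreas.getD d 0 := by
  unfold PySem.Dict.getD
  cases h : pvEnclosedAreas.get? d with
  | none => simp
  | some v =>
    unfold PySem.Dict.get? at h
    rcases Option.map_eq_some_iff.1 h with ⟨⟨a, b⟩, hf, rfl⟩
    have hit : pvEnclosedAreas.items =
        [((0 : Int), (1 : Int)), (1, 0), (2, 0), (3, 0), (4, 1), (5, 0), (6, 1), (7, 0), (8, 2), (9, 1)] := by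
      decide
    rw [hit] at hf
    have hm := List.mem_of_find?_eq_some hf
    fin_cases hm <;> simp

lemma chArea_nonneg (c : Char) : 0 ≤ pvChArea c := getD_areas_nonneg _

lemma areaSumFuel_eq (n : Nat) : ∀ (f : Nat) (t : Int), n < f →
    areaSumFuel f (n : Int) t = t + ((Nat.toDigits 10 n).map pvChArea).sum := by
  induction n using Nat.strong_induction_on with
  | _ n ih =>
    intro f t hf
    obtain ⟨f, rfl⟩ : ∃ f', f = f' + 1 := ⟨f - 1, by omega⟩
    have hq : PySem.Int.floordiv (n : Int) 10 = ((n / 10 : Nat) : Int) := by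
      exact_mod_cast PySem.Int.floordiv_natCast n 10
    have hd : PySem.Int.mod (n : Int) 10 = ((n % 10 : Nat) : Int) := by
      exact_mod_cast PySem.Int.mod_natCast n 10
    by_cases hn : n < 10
    · have : (Nat.toDigits 10 n) = [Nat.digitChar n] := Nat.toDigits_of_lt_base hn
      simp only [areaSumFuel, hq, hd, this, List.map_cons, List.map_nil, List.sum_cons,
        List.sum_nil, add_zero]
      rw [if_pos (by exact_mod_cast congrArg (Nat.cast : Nat → Int) (Nat.div_eq_of_lt hn))]
      rw [chArea_digitChar n hn, Nat.mod_eq_of_lt hn]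
    · have hq0 : ((n / 10 : Nat) : Int) ≠ 0 := by
        have : 1 ≤ n / 10 := Nat.le_div_iff_mul_le (by norm_num) |>.2 (by omega)
        exact_mod_cast Nat.one_le_iff_ne_zero.1 this
      simp only [areaSumFuel, hq, hd, if_neg hq0]
      rw [ih (n / 10) (by omega) f _ (by omega)]
      conv_rhs => rw [Nat.toDigits_eq_if (by norm_num), if_neg hn]
      rw [List.map_append, List.sum_append]
      simp only [List.map_cons, List.map_nil, List.sum_cons, List.sum_nil, add_zero]
      rw [chArea_digitChar (n % 10) (Nat.mod_lt n (by norm_num))]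
      ring

lemma g_eq_areaSum (x : Int) (hx : 0 ≤ x) : real_g_4_life x = pv_area_sum x := by
  lift x to Nat using hx
  unfold pv_area_sum
  rw [Int.natAbs_natCast, areaSumFuel_eq x (x + 1) 0 (by omega), zero_add]
  unfold real_g_4_life
  rw [show PySem.Int.toChars (x : Int) = Nat.toDigits 10 x by
    simp [PySem.Int.toChars, not_lt.2 (Int.natCast_nonneg x)]]
  simp only [List.map_map]
  rfl

lemma g_nonneg (x : Int) : 0 ≤ real_g_4_life x := by
  unfold real_g_4_life
  simp only [List.map_map]
  apply List.sum_nonneg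
  intro a ha
  obtain ⟨c, _, rfl⟩ := List.mem_map.1 ha
  exact chArea_nonneg c

lemma main_eq : ∀ (f : Nat) (x k : Int), 0 ≤ x → recFuelA f x k = recFuelB f x k := by
  intro f
  induction f with
  | zero => intro x k _; rfl
  | succ f ih =>
    intro x k hx
    by_cases hk : k = 0
    · simp [recFuelA, recFuelB, hk]
    · by_cases h0 : x = 0
      · subst h0
        simp [recFuelA, recFuelB, hk]
        have h := PySem.Int.mod_two_eq k
        rw [PySem.Int.mod_eq_emod_of_pos (by norm_num)] at h
        split_ifs <;> omega
      · by_cases h12 : x = 1 ∨ x = 2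
        · rcases h12 with rfl | rfl <;>
            (simp [recFuelA, recFuelB, hk];
             have h := PySem.Int.mod_two_eq k;
             rw [PySem.Int.mod_eq_emod_of_pos (by norm_num)] at h;
             split_ifs <;> omega)
        · have hx3 : x > 2 := by omega
          have hg := g_eq_areaSum x (by omega)
          simp only [recFuelA, recFuelB, if_neg hk, if_neg h0, if_neg h12,
            if_pos (show k ≠ 0 ∧ x > 2 from ⟨hk, hx3⟩)]
          rw [← hg]
          exact ih _ _ (g_nonneg x)

-- ===== VERDICT (by name: the statement is the Claim_ definition above) =====
theorem recursive_function_spec : Claim_equal_recursive_function := by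
  intro x k _ hpre
  unfold Spec_recursive_function recursive_function recursive_function_alt
  rcases hpre with hx | hk
  · exact main_eq _ x k hx
  · subst hk
    show recFuelA (x.natAbs + 0 + 1) x 0 = recFuelB (x.natAbs + 0 + 1) x 0
    simp [recFuelA, recFuelB]
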